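-- pv_equiv track=rewrite | github.com/jio-ping/coding-test | 120903.py | solution
-- ===== SOURCE A (Python) =====
-- def solution(arr1, arr2):
--     count = 0
--     duplicated_list = []
--     for arr in arr2:
--         if arr in arr1 and arr not in duplicated_list:
--             duplicated_list.append(arr)
--             count+=1
--     return count
-- ===== SOURCE B (Python) =====
-- def solution(arr1, arr2):
--     xs = sorted(set(arr2))
--     ys = sorted(set(arr1))
--     i = j = count = 0
--     while i < len(xs) and j < len(ys):
--         if xs[i] < ys[j]:
--             i += 1
--         elif ys[j] < xs[i]:
--             j += 1
--         else:
--             count += 1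
--             i += 1
--             j += 1
--     return count
-- ===== Notes on version B (the rewrite author's own statement) =====
-- stated objective: faster
-- what changed: Replaced A's per-element linear membership scans with a sort of each deduplicated array followed by a two-pointer merge walk that counts the common values.
import Mathlib
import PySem

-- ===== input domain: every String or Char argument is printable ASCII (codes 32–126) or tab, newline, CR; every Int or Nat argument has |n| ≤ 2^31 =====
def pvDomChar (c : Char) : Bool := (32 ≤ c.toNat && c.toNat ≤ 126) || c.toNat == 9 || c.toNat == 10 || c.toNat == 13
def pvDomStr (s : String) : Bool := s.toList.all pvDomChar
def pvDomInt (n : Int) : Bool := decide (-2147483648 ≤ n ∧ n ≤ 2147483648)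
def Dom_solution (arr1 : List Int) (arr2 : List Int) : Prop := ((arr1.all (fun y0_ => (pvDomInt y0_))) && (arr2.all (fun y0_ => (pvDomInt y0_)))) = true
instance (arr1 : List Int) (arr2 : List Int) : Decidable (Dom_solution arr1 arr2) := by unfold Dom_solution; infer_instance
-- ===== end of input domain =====

-- B replaces A's per-element linear membership scans with sorting the deduplicated arrays and counting common values by a two-pointer merge (faster).


-- ===== PORT A =====
-- for arr in arr2: if arr in arr1 and arr not in duplicated_list: append; count += 1
def solution (arr1 : List Int) (arr2 : List Int) : Int :=
  (arr2.foldl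
    (fun (st : Int × List Int) a =>
      if a ∈ arr1 ∧ a ∉ st.2 then (st.1 + 1, st.2 ++ [a]) else st)
    (0, [])).1

-- ===== PORT B =====
-- the while loop over indices i, j: recursion on the two remaining suffixes
def pvMerge : List Int → List Int → Int
  | [], _ => 0
  | _ :: _, [] => 0
  | x :: xs, y :: ys =>
    if x < y then pvMerge xs (y :: ys)
    else if y < x then pvMerge (x :: xs) ys
    else 1 + pvMerge xs ys
termination_by xs ys => xs.length + ys.length

-- xs = sorted(set(arr2)); ys = sorted(set(arr1)); two-pointer walk
def solution_alt (arr1 : List Int) (arr2 : List Int) : Int :=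
  pvMerge (PySem.List.sorted (PySem.Set.ofList arr2) (fun x => x) false)
          (PySem.List.sorted (PySem.Set.ofList arr1) (fun x => x) false)

-- ===== PRECONDITION & SPEC =====
def Spec_solution (arr1 : List Int) (arr2 : List Int) (out : Int) : Prop := out = solution_alt arr1 arr2
instance (arr1 : List Int) (arr2 : List Int) (out : Int) : Decidable (Spec_solution arr1 arr2 out) := by unfold Spec_solution; infer_instance

-- ===== CLAIM (what is proved, stated in full; the proofs are below) =====
def Claim_equal_solution : Prop := ∀ (arr1 : List Int) (arr2 : List Int), Dom_solution arr1 arr2 → Spec_solution arr1 arr2 (solution arr1 arr2)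

-- ===== LEMMAS AND PROOFS =====

/-- A's filtered deduplicating accumulation: add `a` only when `a ∈ arr1`. -/
def pvStep (arr1 : List Int) (d : List Int) (a : Int) : List Int :=
  if a ∈ arr1 then PySem.Set.add d a else d

/-- A's fold equals the count of elements added by `pvStep`, paired with that accumulator. -/
theorem solution_fold_eq (arr1 arr2 : List Int) :
    ∀ (c : Int) (dup : List Int),
      arr2.foldl
        (fun (st : Int × List Int) a =>
          if a ∈ arr1 ∧ a ∉ st.2 then (st.1 + 1, st.2 ++ [a]) else st)
        (c, dup)
      = (c + ((arr2.foldl (pvStep arr1) dup).length : Int) - (dup.length : Int),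
         arr2.foldl (pvStep arr1) dup) := by
  induction arr2 with
  | nil => intro c dup; simp
  | cons a rest ih =>
    intro c dup
    by_cases h1 : a ∈ arr1
    · by_cases h2 : a ∈ dup
      · simp [List.foldl_cons, h1, h2, pvStep, ih]
      · have hc : a ∈ arr1 ∧ a ∉ dup := ⟨h1, h2⟩
        simp only [List.foldl_cons, if_pos hc, pvStep, if_pos h1,
          PySem.Set.add_of_not_mem h2, ih]
        refine Prod.ext ?_ rfl
        simp only [List.length_append, List.length_cons, List.length_nil]
        push_cast
        ring
    · simp [List.foldl_cons, pvStep, h1, ih]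

/-- Filtering by membership in `arr1` commutes with `Set.add`. -/
theorem filter_add (arr1 : List Int) (d : List Int) (a : Int) :
    (PySem.Set.add d a).filter (fun x => decide (x ∈ arr1)) =
      pvStep arr1 (d.filter (fun x => decide (x ∈ arr1))) a := by
  by_cases h2 : a ∈ d
  · rw [PySem.Set.add_of_mem h2]
    by_cases h1 : a ∈ arr1
    · have : a ∈ d.filter (fun x => decide (x ∈ arr1)) := by
        simp [List.mem_filter, h2, h1]
      simp [pvStep, h1, PySem.Set.add_of_mem this]
    · simp [pvStep, h1]
  · rw [PySem.Set.add_of_not_mem h2]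
    by_cases h1 : a ∈ arr1
    · have : a ∉ d.filter (fun x => decide (x ∈ arr1)) := by
        simp [List.mem_filter]; intro h; exact absurd h h2
      simp [pvStep, h1, PySem.Set.add_of_not_mem this, List.filter_append]
    · simp [pvStep, h1, List.filter_append]

/-- Pushing the filter through the `Set.add` fold gives the `pvStep` fold. -/
theorem filter_fold (arr1 : List Int) :
    ∀ (arr2 d : List Int),
      (arr2.foldl PySem.Set.add d).filter (fun x => decide (x ∈ arr1)) =
        arr2.foldl (pvStep arr1) (d.filter (fun x => decide (x ∈ arr1))) := by
  intro arr2
  induction arr2 with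
  | nil => intro d; rfl
  | cons a rest ih =>
    intro d
    rw [List.foldl_cons, List.foldl_cons, ih, filter_add]

/-- On strictly increasing lists, the two-pointer merge counts the left elements that occur on the right. -/
theorem pvMerge_eq_filter :
    ∀ (xs ys : List Int), xs.Pairwise (· < ·) → ys.Pairwise (· < ·) →
      pvMerge xs ys = ((xs.filter (fun x => decide (x ∈ ys))).length : Int)
  | [], ys, _, _ => by simp [pvMerge]
  | x :: xs, [], _, _ => by simp [pvMerge]
  | x :: xs, y :: ys, hx, hy => by
    have hx' := hx.of_cons
    have hy' := hy.of_cons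
    rcases lt_trichotomy x y with h | h | h
    · -- x < y: x is below everything on the right, so x ∉ y :: ys
      have hnm : x ∉ y :: ys := by
        intro hm
        rcases List.mem_cons.mp hm with rfl | hm
        · exact lt_irrefl x h
        · exact lt_irrefl x (h.trans (List.rel_of_pairwise_cons hy hm))
      rw [pvMerge, if_pos h]
      rw [pvMerge_eq_filter xs (y :: ys) hx' hy,
        List.filter_cons_of_neg (by simpa using hnm)]
    · -- x = y: count it, drop both heads
      subst h
      have h1 : x ∈ x :: ys := List.mem_cons_self ..
      have hnot : ∀ z ∈ xs, (z ∈ x :: ys ↔ z ∈ ys) := by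
        intro z hz
        have hxz := List.rel_of_pairwise_cons hx hz
        constructor
        · intro hm
          rcases List.mem_cons.mp hm with rfl | hm
          · exact absurd hxz (lt_irrefl z)
          · exact hm
        · exact List.mem_cons_of_mem _
      rw [pvMerge, if_neg (lt_irrefl x), if_neg (lt_irrefl x)]
      rw [pvMerge_eq_filter xs ys hx' hy']
      have : xs.filter (fun z => decide (z ∈ x :: ys)) = xs.filter (fun z => decide (z ∈ ys)) := by
        apply List.filter_congr
        intro z hz
        simp [hnot z hz]
      rw [List.filter_cons_of_pos (by simp), this, List.length_cons]
      push_cast; ring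
    · -- y < x: y is below everything on the left, so it matches nothing there
      have hnot : ∀ z ∈ x :: xs, (z ∈ y :: ys ↔ z ∈ ys) := by
        intro z hz
        have hyz : y < z := by
          rcases List.mem_cons.mp hz with rfl | hz
          · exact h
          · exact h.trans (List.rel_of_pairwise_cons hx hz)
        constructor
        · intro hm
          rcases List.mem_cons.mp hm with rfl | hm
          · exact absurd hyz (lt_irrefl z)
          · exact hm
        · exact List.mem_cons_of_mem _
      rw [pvMerge, if_neg (not_lt.mpr h.le), if_pos h]
      rw [pvMerge_eq_filter (x :: xs) ys hx hy']
      have : (x :: xs).filter (fun z => decide (z ∈ y :: ys))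
           = (x :: xs).filter (fun z => decide (z ∈ ys)) := by
        apply List.filter_congr
        intro z hz
        simp [hnot z hz]
      rw [this]
termination_by xs ys => xs.length + ys.length

-- ===== VERDICT (by name: the statement is the Claim_ definition above) =====
theorem solution_spec : Claim_equal_solution := by
  intro arr1 arr2 _
  unfold Spec_solution solution solution_alt
  rw [solution_fold_eq arr1 arr2 0 []]
  simp only [List.length_nil, Int.natCast_zero, zero_add, sub_zero]
  rw [pvMerge_eq_filter _ _ (PySem.List.sorted_ofList_pairwise_lt _)
        (PySem.List.sorted_ofList_pairwise_lt _)]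
  -- membership in sorted(set(arr1)) is membership in arr1
  have hmem : (fun x : Int => decide (x ∈ PySem.List.sorted (PySem.Set.ofList arr1) (fun x => x) false))
            = (fun x : Int => decide (x ∈ arr1)) := by
    funext x
    simp [PySem.List.mem_sorted, PySem.Set.mem_ofList]
  rw [hmem]
  -- sorted is a permutation, so the filter has the same length
  have hperm : (PySem.List.sorted (PySem.Set.ofList arr2) (fun x => x) false).Perm
      (PySem.Set.ofList arr2) := PySem.List.sorted_perm _ _ _
  rw [(hperm.filter _).length_eq]
  rw [PySem.Set.ofList_eq_foldl, filter_fold arr1 arr2 []]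
  rfl
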